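-- pv_equiv track=rewrite | github.com/caretim/TIL | 코테의민족/8월27일자/모의고사.py | b_list
-- ===== SOURCE A (Python) =====
-- b_num_list = [1,3,4,5]
--
-- def b_list(i):
--     cnt = 0
--     return_list = []
--     for j in range(1,i+1):
--         if j%2 == 0:
--             return_list.append(b_num_list[cnt])
--             cnt+=1
--             if cnt ==4:
--                 cnt=0
--         else:
--             return_list.append(2)
--     return return_list
-- ===== SOURCE B (Python) =====
-- PATTERN = [2, 1, 2, 3, 2, 4, 2, 5]
--
-- def b_list(i):
--     # The output is periodic with period 8: one modular table lookup per element,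
--     # no branch and no wrapping counter.
--     return [PATTERN[k % 8] for k in range(i)]
-- ===== Notes on version B (the rewrite author's own statement) =====
-- stated objective: simpler
-- what changed: Replaced A's two-branch state machine with a wrapping counter by a single precomputed period-8 table indexed with k % 8.
import Mathlib
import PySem

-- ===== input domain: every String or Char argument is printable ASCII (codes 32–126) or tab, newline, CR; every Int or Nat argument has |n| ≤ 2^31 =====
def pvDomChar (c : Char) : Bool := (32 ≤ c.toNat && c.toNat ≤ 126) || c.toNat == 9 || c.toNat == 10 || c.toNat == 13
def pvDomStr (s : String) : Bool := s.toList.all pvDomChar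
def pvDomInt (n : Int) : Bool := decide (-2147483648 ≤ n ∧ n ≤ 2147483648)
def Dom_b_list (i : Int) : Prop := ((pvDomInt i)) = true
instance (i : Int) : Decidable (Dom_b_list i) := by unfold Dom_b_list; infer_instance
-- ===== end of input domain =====

-- B replaces A's two-branch loop with a wrapping counter by a period-8 table indexed with k % 8 (simpler).

-- ===== PORT A =====
def b_num_list : List Int := [1, 3, 4, 5]

-- cnt stays in 0..3 throughout, so Python's b_num_list[cnt] never raises; pyGetD with default 0 is exact here.
def b_list (i : Int) : List Int :=
  ((PySem.List.pyRange 1 (i + 1) 1).foldl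
    (fun (st : Int × List Int) j =>
      if j % 2 == 0 then
        let l := st.2 ++ [PySem.List.pyGetD b_num_list st.1 0]
        let c := st.1 + 1
        if c == 4 then (0, l) else (c, l)
      else (st.1, st.2 ++ [2]))
    (0, [])).2

-- ===== PORT B =====
def b_list_alt (i : Int) : List Int :=
  (PySem.List.pyRange 0 i 1).map
    (fun k => PySem.List.pyGetD [2, 1, 2, 3, 2, 4, 2, 5] (k % 8) 0)

-- ===== PRECONDITION & SPEC =====
def Spec_b_list (i : Int) (out : List Int) : Prop := out = b_list_alt i
instance (i : Int) (out : List Int) : Decidable (Spec_b_list i out) := by unfold Spec_b_list; infer_instance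

-- ===== CLAIM (what is proved, stated in full; the proofs are below) =====
def Claim_equal_b_list : Prop := ∀ (i : Int), Dom_b_list i → Spec_b_list i (b_list i)

-- ===== LEMMAS AND PROOFS =====

-- Loop invariant for A: after processing j = 1..n the counter is (n/2) % 4 and the
-- accumulated list is exactly B's table lookup over k = 0..n-1.
lemma b_list_loop_inv (n : Nat) :
    (PySem.List.pyRange 1 ((n : Int) + 1) 1).foldl
      (fun (st : Int × List Int) j =>
        if j % 2 == 0 then
          let l := st.2 ++ [PySem.List.pyGetD b_num_list st.1 0]
          let c := st.1 + 1
          if c == 4 then (0, l) else (c, l)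
        else (st.1, st.2 ++ [2]))
      (0, []) =
    (((n / 2 % 4 : Nat) : Int),
     (PySem.List.pyRange 0 (n : Int) 1).map
       (fun k => PySem.List.pyGetD [2, 1, 2, 3, 2, 4, 2, 5] (k % 8) 0)) := by
  induction n with
  | zero =>
      simp [PySem.List.pyRange_one_eq_nil]
  | succ n ih =>
      have h1 : ((n + 1 : Nat) : Int) + 1 = ((n : Int) + 1) + 1 := by push_cast; ring
      have h2 : ((n + 1 : Nat) : Int) = (n : Int) + 1 := by push_cast; ring
      rw [h1, PySem.List.pyRange_one_succ_right (by omega : (1 : Int) ≤ (n : Int) + 1),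
          List.foldl_append, ih, h2,
          PySem.List.pyRange_one_succ_right (by omega : (0 : Int) ≤ (n : Int)),
          List.map_append]
      have hmod : ((n : Int) % 8) = ((n % 8 : Nat) : Int) := by omega
      rcases Nat.even_or_odd n with he | ho
      · -- j = n+1 is odd: else-branch appends 2; counter unchanged
        obtain ⟨m, hm⟩ := he
        have hj : ((n : Int) + 1) % 2 ≠ 0 := by omega
        have hr : n % 8 = 0 ∨ n % 8 = 2 ∨ n % 8 = 4 ∨ n % 8 = 6 := by omega
        have hcnt : (n + 1) / 2 % 4 = n / 2 % 4 := by omega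
        simp only [List.foldl_cons, List.foldl_nil, beq_iff_eq, hj, if_false, hcnt,
          List.map_cons, List.map_nil]
        rw [hmod]
        rcases hr with h | h | h | h <;> rw [h] <;> simp [PySem.List.pyGetD]
      · -- j = n+1 is even: then-branch appends b_num_list[cnt] and steps the counter
        obtain ⟨m, hm⟩ := ho
        have hj : ((n : Int) + 1) % 2 = 0 := by omega
        have hr : n % 8 = 1 ∨ n % 8 = 3 ∨ n % 8 = 5 ∨ n % 8 = 7 := by omega
        simp only [List.foldl_cons, List.foldl_nil, beq_iff_eq, hj, if_true,
          List.map_cons, List.map_nil]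
        rw [hmod]
        rcases hr with h | h | h | h <;> rw [h] <;>
          rw [show n / 2 % 4 = (n % 8) / 2 by omega, h] <;>
          rw [show (n + 1) / 2 % 4 = ((n % 8) / 2 + 1) % 4 by omega, h] <;>
          simp [PySem.List.pyGetD, b_num_list]

-- ===== VERDICT (by name: the statement is the Claim_ definition above) =====
theorem b_list_spec : Claim_equal_b_list := by
  intro i _
  unfold Spec_b_list b_list b_list_alt
  by_cases hi : 0 ≤ i
  · obtain ⟨n, rfl⟩ : ∃ n : Nat, i = (n : Int) := ⟨i.toNat, (Int.toNat_of_nonneg hi).symm⟩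
    rw [b_list_loop_inv n]
  · rw [PySem.List.pyRange_one_eq_nil (by omega),
        PySem.List.pyRange_one_eq_nil (by omega : i ≤ 0)]
    simp
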